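-- pv_equiv track=rewrite | github.com/Rutsini/TPR | funciones.py | analizar_palabras
-- ===== SOURCE A (Python) =====
-- def analizar_palabras(texto):
--     mayusculas = "QWERTYUIOPÑLKJHGFDSAZXCVBNM"
--     letra_t = "t"
--     letra_s = "s"
--     cont_pal = 0
--     cont_car = 0
--     bandera_mayus = False
--     bandera_letra_s = False
--     bandera_letra_t = False
--     cont = 0
--
--     for car in texto:
--         if car == " " or car == ".":
--             cont_pal += 1
--             if bandera_mayus and bandera_letra_t and bandera_letra_s:
--                 cont += 1
--
--             cont_car = 0
--             bandera_mayus = False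
--             bandera_letra_s = False
--             bandera_letra_t = False
--
--
--         else:
--             cont_car += 1
--
--             if car in mayusculas and cont_car == 1:
--                 bandera_mayus = True
--
--             if car in letra_s:
--                 bandera_letra_s = True
--
--             if car in letra_t:
--                 bandera_letra_t = True
--
--     return cont
-- ===== SOURCE B (Python) =====
-- def analizar_palabras(texto):
--     mayusculas = "QWERTYUIOPÑLKJHGFDSAZXCVBNM"
--     palabras = texto.replace('.', ' ').split(' ')[:-1]
--     return sum(1 for p in palabras if p and p[0] in mayusculas and 's' in p and 't' in p)
-- ===== Notes on version B (the rewrite author's own statement) =====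
-- stated objective: simpler
-- what changed: Replaced A's char-by-char state machine (per-word flags for uppercase start and for the two required letters, reset at each delimiter) by a two-phase pass: normalize the dot delimiter to a space, split on spaces, drop the unterminated last piece, then count the words that start with a letter of the fixed uppercase set and contain both required letters.
import Mathlib
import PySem

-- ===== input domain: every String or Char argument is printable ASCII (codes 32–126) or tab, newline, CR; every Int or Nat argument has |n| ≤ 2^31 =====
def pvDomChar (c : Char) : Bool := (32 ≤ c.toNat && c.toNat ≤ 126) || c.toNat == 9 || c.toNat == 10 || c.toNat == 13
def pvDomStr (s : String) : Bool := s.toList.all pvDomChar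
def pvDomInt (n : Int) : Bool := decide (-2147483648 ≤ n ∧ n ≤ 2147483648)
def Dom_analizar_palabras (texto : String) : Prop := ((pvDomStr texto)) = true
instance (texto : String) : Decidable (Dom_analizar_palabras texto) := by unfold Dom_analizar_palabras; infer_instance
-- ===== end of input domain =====

-- B tokenizes first (replace '.' by ' ', split on ' ', drop the unterminated last piece) and
-- then counts good words in a second pass, instead of A's char-by-char flag state machine;
-- objective: simpler.

-- ===== PORT A =====
-- the body of A's for-loop; state = (cont_pal, cont_car, bandera_mayus, bandera_letra_s, bandera_letra_t, cont)
def pvStepA (mayusculas letra_t letra_s : List Char)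
    (st : Int × Int × Bool × Bool × Bool × Int) (car : Char) :
    Int × Int × Bool × Bool × Bool × Int :=
  let (cont_pal, cont_car, bandera_mayus, bandera_letra_s, bandera_letra_t, cont) := st
  if car = ' ' ∨ car = '.' then
    (cont_pal + 1, 0, false, false, false,
     if bandera_mayus && bandera_letra_t && bandera_letra_s then cont + 1 else cont)
  else
    let cont_car := cont_car + 1
    let bandera_mayus :=
      if PySem.Chars.isIn [car] mayusculas && cont_car == 1 then true else bandera_mayus
    let bandera_letra_s :=
      if PySem.Chars.isIn [car] letra_s then true else bandera_letra_s
    let bandera_letra_t :=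
      if PySem.Chars.isIn [car] letra_t then true else bandera_letra_t
    (cont_pal, cont_car, bandera_mayus, bandera_letra_s, bandera_letra_t, cont)

def analizar_palabras (texto : String) : Int :=
  let mayusculas := "QWERTYUIOPÑLKJHGFDSAZXCVBNM"
  let letra_t := "t"
  let letra_s := "s"
  let fin := texto.toList.foldl (pvStepA mayusculas.toList letra_t.toList letra_s.toList)
    (0, 0, false, false, false, 0)
  fin.2.2.2.2.2

-- ===== PORT B =====
-- 'p and p[0] in mayusculas and "s" in p and "t" in p' (p[0] only reached when p is non-empty)
def pvGoodWord (mayusculas : List Char) (p : List Char) : Bool :=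
  match PySem.List.pyGet? p 0 with
  | none => false
  | some c =>
      PySem.Chars.isIn [c] mayusculas && PySem.Chars.isIn ['s'] p && PySem.Chars.isIn ['t'] p

def analizar_palabras_alt (texto : String) : Int :=
  let mayusculas := "QWERTYUIOPÑLKJHGFDSAZXCVBNM"
  let palabras := PySem.List.slice
    (PySem.Chars.splitOn (PySem.Str.replace texto "." " ").toList " ".toList)
    none (some (-1))
  ((palabras.filter (pvGoodWord mayusculas.toList)).length : Int)

-- ===== PRECONDITION & SPEC =====
def Spec_analizar_palabras (texto : String) (out : Int) : Prop := out = analizar_palabras_alt texto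
instance (texto : String) (out : Int) : Decidable (Spec_analizar_palabras texto out) := by unfold Spec_analizar_palabras; infer_instance

-- ===== CLAIM (what is proved, stated in full; the proofs are below) =====
def Claim_equal_analizar_palabras : Prop := ∀ (texto : String), Dom_analizar_palabras texto → Spec_analizar_palabras texto (analizar_palabras texto)

-- ===== LEMMAS AND PROOFS =====

-- replacing '.' by ' ' characterwise
def pvSub (c : Char) : Char := if c = '.' then ' ' else c

-- split on the two delimiters / on ' ' only, nice structural recursions
def pvConsFirst (w : List Char) : List (List Char) → List (List Char)
  | [] => [w]
  | x :: xs => (w ++ x) :: xs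

def pvSplitD : List Char → List (List Char)
  | [] => [[]]
  | c :: t => if c = ' ' ∨ c = '.' then [] :: pvSplitD t else pvConsFirst [c] (pvSplitD t)

def pvSplitSp : List Char → List (List Char)
  | [] => [[]]
  | c :: t => if c = ' ' then [] :: pvSplitSp t else pvConsFirst [c] (pvSplitSp t)

def pvFirstU (U : List Char) : List Char → Bool
  | [] => false
  | c :: _ => U.contains c

-- the word-so-far flags extended over a whole segment
def pvGoodExt (U : List Char) (z bm bs bt : Bool) (seg : List Char) : Bool :=
  (bm || (z && pvFirstU U seg)) && (bt || seg.contains 't') && (bs || seg.contains 's')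

-- count of completed good words over the segment list (last segment never counted)
def pvCnt (U : List Char) (z bm bs bt : Bool) : List (List Char) → Int
  | [] => 0
  | [_] => 0
  | seg :: rest => (if pvGoodExt U z bm bs bt seg then 1 else 0) + pvCnt U true false false false rest

theorem pvSplitSp_ne_nil (l : List Char) : pvSplitSp l ≠ [] := by
  cases l with
  | nil => simp [pvSplitSp]
  | cons c t =>
    simp only [pvSplitSp]
    split
    · simp
    · cases h : pvSplitSp t <;> simp [pvConsFirst]

theorem pvSplitD_ne_nil (l : List Char) : pvSplitD l ≠ [] := by
  cases l with
  | nil => simp [pvSplitD]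
  | cons c t =>
    simp only [pvSplitD]
    split
    · simp
    · cases h : pvSplitD t <;> simp [pvConsFirst]

theorem pv_isIn_singleton (c : Char) (l : List Char) :
    PySem.Chars.isIn [c] l = l.contains c := by
  by_cases h : c ∈ l
  · obtain ⟨s, t, rfl⟩ := List.append_of_mem h
    have hinf : [c] <:+: s ++ c :: t := ⟨s, t, by simp⟩
    simp [(PySem.Chars.isIn_iff_infix [c] _).mpr hinf, List.contains_eq_mem, h]
  · have hinf : ¬ ([c] <:+: l) := by
      intro hin
      exact h (hin.subset (by simp))
    simp [(PySem.Chars.isIn_eq_false_iff [c] l).mpr hinf, List.contains_eq_mem, h]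

theorem pv_replace_go (l : List Char) : ∀ (fuel : Nat) (acc : List Char), l.length ≤ fuel →
    PySem.Chars.replace.go ['.'] [' '] fuel l acc = acc.reverse ++ l.map pvSub := by
  induction l with
  | nil =>
    intro fuel acc _
    cases fuel <;> simp [PySem.Chars.replace.go]
  | cons c t ih =>
    intro fuel acc hf
    cases fuel with
    | zero => simp at hf
    | succ n =>
      rw [PySem.Chars.replace.go]
      by_cases hc : c = '.'
      · subst hc
        have hp : List.isPrefixOf ['.'] ('.' :: t) = true := by simp [List.isPrefixOf]
        simp only [hp, if_true, List.length_cons, List.length_nil, List.drop_succ_cons,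
          List.drop_zero, List.reverse_cons, List.reverse_nil, List.nil_append,
          List.singleton_append]
        rw [ih n (' ' :: acc) (by simpa using Nat.lt_succ_iff.mp (by simpa using hf))]
        simp [pvSub]
      · have hp : List.isPrefixOf ['.'] (c :: t) = false := by
          simp [List.isPrefixOf]; exact fun h => hc h.symm
        simp only [hp, Bool.false_eq_true, if_false]
        rw [ih n (c :: acc) (by simpa using Nat.lt_succ_iff.mp (by simpa using hf))]
        simp [pvSub, hc]

theorem pv_replace_eq (l : List Char) :
    PySem.Chars.replace l ['.'] [' '] = l.map pvSub := by
  rw [PySem.Chars.replace]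
  rw [if_neg (by simp)]
  simpa using pv_replace_go l l.length [] (le_refl _)

theorem pv_split_go (l : List Char) : ∀ (fuel : Nat) (cur : List Char) (acc : List (List Char)),
    l.length ≤ fuel →
    PySem.Chars.splitOn.go [' '] fuel l cur acc =
      acc.reverse ++ pvConsFirst cur.reverse (pvSplitSp l) := by
  induction l with
  | nil =>
    intro fuel cur acc _
    cases fuel <;> simp [PySem.Chars.splitOn.go, pvSplitSp, pvConsFirst]
  | cons c t ih =>
    intro fuel cur acc hf
    cases fuel with
    | zero => simp at hf
    | succ n =>
      rw [PySem.Chars.splitOn.go]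
      by_cases hc : c = ' '
      · subst hc
        have hp : List.isPrefixOf [' '] (' ' :: t) = true := by simp [List.isPrefixOf]
        simp only [hp, if_true, List.length_cons, List.length_nil, List.drop_succ_cons,
          List.drop_zero]
        rw [ih n [] (cur.reverse :: acc) (by simpa using Nat.lt_succ_iff.mp (by simpa using hf))]
        obtain ⟨x, xs, hx⟩ : ∃ x xs, pvSplitSp t = x :: xs := by
          cases h : pvSplitSp t with
          | nil => exact absurd h (pvSplitSp_ne_nil t)
          | cons x xs => exact ⟨x, xs, rfl⟩
        simp [pvSplitSp, hx, pvConsFirst]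
      · have hp : List.isPrefixOf [' '] (c :: t) = false := by
          simp [List.isPrefixOf]; exact fun h => hc h.symm
        simp only [hp, Bool.false_eq_true, if_false]
        rw [ih n (c :: cur) acc (by simpa using Nat.lt_succ_iff.mp (by simpa using hf))]
        obtain ⟨x, xs, hx⟩ : ∃ x xs, pvSplitSp t = x :: xs := by
          cases h : pvSplitSp t with
          | nil => exact absurd h (pvSplitSp_ne_nil t)
          | cons x xs => exact ⟨x, xs, rfl⟩
        simp [pvSplitSp, hx, pvConsFirst, hc]

theorem pv_split_eq (l : List Char) :
    PySem.Chars.splitOn l [' '] = pvSplitSp l := by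
  rw [PySem.Chars.splitOn]
  rw [pv_split_go l (l.length + 1) [] [] (by omega)]
  obtain ⟨x, xs, hx⟩ : ∃ x xs, pvSplitSp l = x :: xs := by
    cases h : pvSplitSp l with
    | nil => exact absurd h (pvSplitSp_ne_nil l)
    | cons x xs => exact ⟨x, xs, rfl⟩
  simp [hx, pvConsFirst]

theorem pv_splitSp_map (l : List Char) : pvSplitSp (l.map pvSub) = pvSplitD l := by
  induction l with
  | nil => simp [pvSplitSp, pvSplitD]
  | cons c t ih =>
    by_cases hc : c = '.'
    · subst hc; simp [pvSplitSp, pvSplitD, pvSub, ih]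
    · by_cases hs : c = ' '
      · subst hs; simp [pvSplitSp, pvSplitD, pvSub, ih]
      · simp [pvSplitSp, pvSplitD, pvSub, hc, hs, ih]

-- the state machine, run from an arbitrary mid-word state, counts the completed good words
theorem pv_foldA_eq (U : List Char) (l : List Char) :
    ∀ (cc : Int), 0 ≤ cc → ∀ (bm bs bt : Bool) (cp cont : Int),
    (l.foldl (pvStepA U ['t'] ['s']) (cp, cc, bm, bs, bt, cont)).2.2.2.2.2 =
      cont + pvCnt U (cc == 0) bm bs bt (pvSplitD l) := by
  induction l with
  | nil =>
    intro cc _ bm bs bt cp cont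
    simp [pvCnt, pvSplitD]
  | cons c t ih =>
    intro cc hcc bm bs bt cp cont
    by_cases hd : c = ' ' ∨ c = '.'
    · simp only [List.foldl_cons, pvStepA, if_pos hd]
      rw [ih 0 (le_refl 0) false false false (cp + 1) _]
      obtain ⟨x, xs, hx⟩ : ∃ x xs, pvSplitD t = x :: xs := by
        cases h : pvSplitD t with
        | nil => exact absurd h (pvSplitD_ne_nil t)
        | cons x xs => exact ⟨x, xs, rfl⟩
      simp only [pvSplitD, if_pos hd, hx, pvCnt, pvGoodExt, pvFirstU]
      cases bm <;> cases bs <;> cases bt <;> simp <;> ring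
    · simp only [List.foldl_cons, pvStepA, if_neg hd]
      have h1 : (cc + 1 == (1 : Int)) = (cc == 0) := by
        by_cases h : cc = 0 <;> simp [h]
      have h0 : (cc + 1 == (0 : Int)) = false := by
        simp; omega
      rw [ih (cc + 1) (by omega)]
      rw [h0]
      obtain ⟨x, xs, hx⟩ : ∃ x xs, pvSplitD t = x :: xs := by
        cases h : pvSplitD t with
        | nil => exact absurd h (pvSplitD_ne_nil t)
        | cons x xs => exact ⟨x, xs, rfl⟩
      simp only [pvSplitD, if_neg hd, hx, pvConsFirst]
      cases xs with
      | nil => simp [pvCnt]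
      | cons y ys =>
        simp only [pvCnt]
        congr 2
        rw [h1]
        simp only [pvGoodExt, pvFirstU, pv_isIn_singleton]
        cases bm <;> cases bs <;> cases bt <;> cases hz : (cc == 0) <;>
          simp [@eq_comm Char]
  termination_by l.length

theorem pvGoodWord_eq (U : List Char) (seg : List Char) :
    pvGoodWord U seg = pvGoodExt U true false false false seg := by
  cases seg with
  | nil => simp [pvGoodWord, pvGoodExt, pvFirstU, PySem.List.pyGet?]
  | cons c t =>
    simp only [pvGoodWord, pvGoodExt, pvFirstU]
    have : PySem.List.pyGet? (c :: t) (0 : Int) = some c := by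
      simp [PySem.List.pyGet?, PySem.List.pyIdx?]
    rw [this]
    simp only [pv_isIn_singleton, Bool.false_or, Bool.true_and]
    cases h1 : (c :: t).contains 's' <;> cases h2 : (c :: t).contains 't' <;>
      cases h3 : U.contains c <;> simp_all [pvFirstU]

theorem pvCnt_eq_filter (U : List Char) (segs : List (List Char)) :
    pvCnt U true false false false segs =
      ((segs.dropLast.filter (pvGoodWord U)).length : Int) := by
  match segs with
  | [] => simp [pvCnt]
  | [seg] => simp [pvCnt]
  | seg :: y :: ys =>
    have ih := pvCnt_eq_filter U (y :: ys)
    simp only [pvCnt, List.dropLast_cons_of_ne_nil (by simp : (y :: ys : List (List Char)) ≠ []),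
      List.filter_cons]
    rw [pvGoodWord_eq]
    cases h : pvGoodExt U true false false false seg <;> simp [ih] <;> ring
  termination_by segs.length

-- ===== VERDICT (by name: the statement is the Claim_ definition above) =====
theorem analizar_palabras_spec : Claim_equal_analizar_palabras := by
  intro texto _
  unfold Spec_analizar_palabras analizar_palabras analizar_palabras_alt
  have ht : "t".toList = ['t'] := rfl
  have hs : "s".toList = ['s'] := rfl
  have hsp : " ".toList = [' '] := rfl
  have hdot : ".".toList = ['.'] := rfl
  simp only [ht, hs, hsp]
  rw [pv_foldA_eq]
  · have hrep : (PySem.Str.replace texto "." " ").toList = texto.toList.map pvSub := by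
      rw [PySem.Str.toList_replace, hdot, hsp]
      exact pv_replace_eq texto.toList
    rw [hrep, pv_split_eq, pv_splitSp_map, PySem.List.slice_to_neg_one]
    have h00 : ((0 : Int) == 0) = true := rfl
    rw [h00, pvCnt_eq_filter]
    simp
  · exact le_refl 0
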